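-- pv_equiv track=rewrite | github.com/Ditoo29/21-22 | FP/LABS/LAB04/4_9.py | reconhece
-- ===== SOURCE A (Python) =====
-- def reconhece(string):
--     if len(string) == 0:
--         return False
--     i = 0
--     while i < len(string) and string[i] in 'ABCD':
--         i += 1
--     if i == 0 or i == len(string):
--         return False
--     while i < len(string) and string[i] in '1234':
--         i += 1
--     return i == len(string)
-- ===== SOURCE B (Python) =====
-- def reconhece(string):
--     # Single-pass DFA: 0 = start, 1 = reading letters, 2 = reading digits, 3 = reject.
--     state = 0
--     for c in string:
--         if state == 0:
--             state = 1 if c in 'ABCD' else 3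
--         elif state == 1:
--             if c in 'ABCD':
--                 state = 1
--             elif c in '1234':
--                 state = 2
--             else:
--                 state = 3
--         elif state == 2:
--             state = 2 if c in '1234' else 3
--     return state == 2
-- ===== Notes on version B (the rewrite author's own statement) =====
-- stated objective: alternative
-- what changed: Replaces A's two staged index-walk while-loops (plus empty/boundary index checks) with a single-pass four-state DFA folded over the characters, accepting iff the final state is 2.
import Mathlib
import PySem

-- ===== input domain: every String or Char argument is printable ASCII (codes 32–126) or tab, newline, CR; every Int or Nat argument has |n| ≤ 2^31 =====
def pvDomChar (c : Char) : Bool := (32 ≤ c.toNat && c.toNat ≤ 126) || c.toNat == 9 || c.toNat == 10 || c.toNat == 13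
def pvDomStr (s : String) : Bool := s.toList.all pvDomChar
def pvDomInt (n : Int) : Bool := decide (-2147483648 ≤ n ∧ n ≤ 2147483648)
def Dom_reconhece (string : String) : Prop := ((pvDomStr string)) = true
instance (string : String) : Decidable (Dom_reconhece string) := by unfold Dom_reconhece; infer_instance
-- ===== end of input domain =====

-- B replaces A's two staged scan loops by a single-pass four-state DFA (alternative, same cost).

-- ===== PORT A =====
-- while i < len(string) and string[i] in 'ABCD': i += 1   (returns final i and the unscanned suffix)
def reconheceLoop1 : List Char → Nat → Nat × List Char
  | [], i => (i, [])
  | c :: cs, i =>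
      if ("ABCD".toList).contains c then reconheceLoop1 cs (i + 1) else (i, c :: cs)

-- while i < len(string) and string[i] in '1234': i += 1
def reconheceLoop2 : List Char → Nat → Nat
  | [], i => i
  | c :: cs, i =>
      if ("1234".toList).contains c then reconheceLoop2 cs (i + 1) else i

def reconhece (string : String) : Bool :=
  let cs := string.toList
  if cs.length = 0 then false
  else
    let r := reconheceLoop1 cs 0
    if r.1 = 0 ∨ r.1 = cs.length then false
    else decide (reconheceLoop2 r.2 r.1 = cs.length)

-- ===== PORT B =====
-- DFA transition: 0 = start, 1 = reading letters, 2 = reading digits, 3 = reject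
def reconheceStep (state : Nat) (c : Char) : Nat :=
  if state = 0 then (if ("ABCD".toList).contains c then 1 else 3)
  else if state = 1 then
    (if ("ABCD".toList).contains c then 1
     else if ("1234".toList).contains c then 2
     else 3)
  else if state = 2 then (if ("1234".toList).contains c then 2 else 3)
  else state

def reconhece_alt (string : String) : Bool :=
  decide (string.toList.foldl reconheceStep 0 = 2)

-- ===== PRECONDITION & SPEC =====
def Spec_reconhece (string : String) (out : Bool) : Prop := out = reconhece_alt string
instance (string : String) (out : Bool) : Decidable (Spec_reconhece string out) := by unfold Spec_reconhece; infer_instance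

-- ===== CLAIM (what is proved, stated in full; the proofs are below) =====
def Claim_equal_reconhece : Prop := ∀ (string : String), Dom_reconhece string → Spec_reconhece string (reconhece string)

-- ===== LEMMAS AND PROOFS =====
theorem loop1_eq : ∀ (cs : List Char) (i : Nat),
    reconheceLoop1 cs i = (i + (cs.takeWhile (fun c => ("ABCD".toList).contains c)).length,
      cs.dropWhile (fun c => ("ABCD".toList).contains c)) := by
  intro cs
  induction cs with
  | nil => intro i; simp [reconheceLoop1]
  | cons c t ih =>
      intro i
      cases h : ("ABCD".toList).contains c with
      | true =>
          simp only [reconheceLoop1, List.takeWhile_cons, List.dropWhile_cons, h, if_true,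
            List.length_cons, ih]
          exact Prod.ext (by omega) rfl
      | false =>
          simp only [reconheceLoop1, List.takeWhile_cons, List.dropWhile_cons, h,
            Bool.false_eq_true, if_false, List.length_nil, Nat.add_zero]

theorem loop2_eq : ∀ (cs : List Char) (i : Nat),
    reconheceLoop2 cs i = i + (cs.takeWhile (fun c => ("1234".toList).contains c)).length := by
  intro cs
  induction cs with
  | nil => intro i; simp [reconheceLoop2]
  | cons c t ih =>
      intro i
      cases h : ("1234".toList).contains c with
      | true =>
          simp only [reconheceLoop2, List.takeWhile_cons, h, if_true, List.length_cons, ih]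
          omega
      | false =>
          simp only [reconheceLoop2, List.takeWhile_cons, h, Bool.false_eq_true, if_false,
            List.length_nil, Nat.add_zero]

-- state 3 is absorbing
theorem fold3 : ∀ (cs : List Char), cs.foldl reconheceStep 3 = 3 := by
  intro cs
  induction cs with
  | nil => rfl
  | cons c t ih => simpa [List.foldl, reconheceStep] using ih

-- from state 2 the DFA accepts iff all remaining chars are digits
theorem fold2 : ∀ (cs : List Char),
    cs.foldl reconheceStep 2 = (if cs.all (fun c => ("1234".toList).contains c) then 2 else 3) := by
  intro cs
  induction cs with
  | nil => rfl
  | cons c t ih =>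
      rw [List.foldl_cons]
      cases h : ("1234".toList).contains c with
      | true =>
          have hs : reconheceStep 2 c = 2 := by simp only [reconheceStep, h]; norm_num
          rw [hs, ih, List.all_cons, h, Bool.true_and]
      | false =>
          have hs : reconheceStep 2 c = 3 := by simp only [reconheceStep, h]; norm_num
          rw [hs, fold3, List.all_cons, h, Bool.false_and]
          rfl

-- from state 1: skip the leading letter run, then the rest must be a nonempty digit run
theorem fold1 : ∀ (cs : List Char),
    cs.foldl reconheceStep 1 =
      (if cs.dropWhile (fun c => ("ABCD".toList).contains c) = [] then 1
       else if (cs.dropWhile (fun c => ("ABCD".toList).contains c)).all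
           (fun c => ("1234".toList).contains c) then 2 else 3) := by
  intro cs
  induction cs with
  | nil => rfl
  | cons c t ih =>
      rw [List.foldl_cons]
      cases hA : ("ABCD".toList).contains c with
      | true =>
          have hs : reconheceStep 1 c = 1 := by simp only [reconheceStep, hA]; norm_num
          rw [hs, ih, List.dropWhile_cons_of_pos hA]
      | false =>
          have hdw : (c :: t).dropWhile (fun c => ("ABCD".toList).contains c) = c :: t := by
            rw [List.dropWhile_cons, hA]; rfl
          cases hD : ("1234".toList).contains c with
          | true =>
              have hs : reconheceStep 1 c = 2 := by simp only [reconheceStep, hA, hD]; norm_num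
              rw [hs, fold2, hdw, if_neg (List.cons_ne_nil c t), List.all_cons, hD, Bool.true_and]
          | false =>
              have hs : reconheceStep 1 c = 3 := by simp only [reconheceStep, hA, hD]; norm_num
              rw [hs, fold3, hdw, if_neg (List.cons_ne_nil c t), List.all_cons, hD, Bool.false_and]
              rfl

-- all-digits iff the digit takeWhile consumes the whole list (length form used by A)
theorem takeWhile_len_iff_all (q : Char → Bool) : ∀ (l : List Char),
    (l.takeWhile q).length = l.length ↔ l.all q := by
  intro l
  induction l with
  | nil => simp
  | cons c t ih =>
      cases h : q c with
      | true => simp [h, ih]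
      | false => simp [h]

theorem reconhece_key (cs : List Char) :
    (if cs.length = 0 then false
     else
       let r := reconheceLoop1 cs 0
       if r.1 = 0 ∨ r.1 = cs.length then false
       else decide (reconheceLoop2 r.2 r.1 = cs.length))
    = decide (cs.foldl reconheceStep 0 = 2) := by
  cases cs with
  | nil => rfl
  | cons c t =>
      cases hA : ("ABCD".toList).contains c with
      | false =>
          have h0 : reconheceStep 0 c = 3 := by
            simp only [reconheceStep, hA]; norm_num
          rw [List.foldl_cons, h0, fold3]
          have htw : (c :: t).takeWhile (fun c => ("ABCD".toList).contains c)
              = [] := by rw [List.takeWhile_cons, hA]; rfl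
          simp only [loop1_eq, htw, List.length_nil, List.length_cons]
          norm_num
      | true =>
          have h0 : reconheceStep 0 c = 1 := by
            simp only [reconheceStep, hA]; norm_num
          rw [List.foldl_cons, h0, fold1]
          have htw : (c :: t).takeWhile (fun c => ("ABCD".toList).contains c)
              = c :: t.takeWhile (fun c => ("ABCD".toList).contains c) :=
            List.takeWhile_cons_of_pos hA
          have hdw : (c :: t).dropWhile (fun c => ("ABCD".toList).contains c)
              = t.dropWhile (fun c => ("ABCD".toList).contains c) :=
            List.dropWhile_cons_of_pos hA
          simp only [loop1_eq, loop2_eq, htw, hdw, List.length_cons]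
          set k := (t.takeWhile (fun c => ("ABCD".toList).contains c)).length with hk
          set rem := t.dropWhile (fun c => ("ABCD".toList).contains c) with hrem
          have hlen : k + rem.length = t.length := by
            have := List.takeWhile_append_dropWhile
              (p := fun c => ("ABCD".toList).contains c) (l := t)
            calc k + rem.length = (t.takeWhile (fun c => ("ABCD".toList).contains c)
                  ++ rem).length := by rw [List.length_append]
              _ = t.length := by rw [hrem, this]
          have hq : (rem.takeWhile (fun c => ("1234".toList).contains c)).length ≤ rem.length :=
            (List.takeWhile_sublist _).length_le
          by_cases hnil : rem = []
          · have hr0 : rem.length = 0 := by rw [hnil]; rfl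
            have hco : (0 + (k + 1) = 0 ∨ 0 + (k + 1) = t.length + 1) := by
              right; omega
            rw [if_pos hco, if_pos hnil]
            simp
          · have hr0 : rem.length ≠ 0 := fun h => hnil (List.eq_nil_of_length_eq_zero h)
            have hco : ¬(0 + (k + 1) = 0 ∨ 0 + (k + 1) = t.length + 1) := by omega
            rw [if_neg hco, if_neg hnil]
            have h1 : (0 + (k + 1) + (rem.takeWhile
                (fun c => ("1234".toList).contains c)).length = t.length + 1)
                ↔ rem.all (fun c => ("1234".toList).contains c) = true := by
              rw [← takeWhile_len_iff_all (fun c => ("1234".toList).contains c) rem]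
              omega
            cases hall : rem.all (fun c => ("1234".toList).contains c) with
            | true =>
                have hP := h1.mpr hall
                rw [if_neg (by omega : ¬(t.length + 1 = 0)), decide_eq_true hP]
                rfl
            | false =>
                have hP : ¬(0 + (k + 1) + (rem.takeWhile
                    (fun c => ("1234".toList).contains c)).length = t.length + 1) := by
                  intro h
                  rw [h1, hall] at h
                  exact Bool.false_ne_true h
                rw [if_neg (by omega : ¬(t.length + 1 = 0)), decide_eq_false hP]
                rfl

-- ===== VERDICT (by name: the statement is the Claim_ definition above) =====
theorem reconhece_spec : Claim_equal_reconhece := by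
  intro s _
  unfold Spec_reconhece reconhece reconhece_alt
  exact reconhece_key s.toList
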